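-- pv_equiv track=rewrite | github.com/SaD-Pr0gEr/codewars | one_punch_man.py | my_case
-- ===== SOURCE A (Python) =====
-- def my_case(health, monsters, damage):
--     counter, hits, damage_sum = 0, 0, 0
--     for i in range(monsters):
--         if counter == 3:
--             counter = 0
--             health -= damage
--             damage_sum += damage
--             hits += 1
--         counter += 1
--     if health <= 0:
--         return "hero died"
--     return f"hits: {hits}, damage: {damage_sum}, health: {health}"
-- ===== SOURCE B (Python) =====
-- def my_case(health, monsters, damage):
--     hits = (monsters - 1) // 3 if monsters > 0 else 0
--     damage_sum = hits * damage
--     health -= damage_sum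
--     if health <= 0:
--         return "hero died"
--     return f"hits: {hits}, damage: {damage_sum}, health: {health}"
-- ===== Notes on version B (the rewrite author's own statement) =====
-- stated objective: faster
-- what changed: Replaces the O(monsters) simulation loop with a closed-form hit count floor((monsters-1)/3) (for monsters>0), deriving damage and health arithmetically.
import Mathlib
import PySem

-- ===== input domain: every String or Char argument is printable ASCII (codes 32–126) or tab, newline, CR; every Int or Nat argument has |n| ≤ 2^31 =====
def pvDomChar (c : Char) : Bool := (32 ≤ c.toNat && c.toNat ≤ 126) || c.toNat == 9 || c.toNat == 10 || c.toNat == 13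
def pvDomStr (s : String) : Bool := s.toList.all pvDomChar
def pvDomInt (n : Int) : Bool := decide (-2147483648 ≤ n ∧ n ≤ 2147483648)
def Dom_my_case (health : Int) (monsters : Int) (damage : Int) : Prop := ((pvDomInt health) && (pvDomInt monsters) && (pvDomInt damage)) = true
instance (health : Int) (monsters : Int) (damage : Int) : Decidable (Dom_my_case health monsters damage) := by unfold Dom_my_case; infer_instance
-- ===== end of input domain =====

-- B replaces A's O(monsters) simulation loop by the closed-form hit count
-- floor((monsters-1)/3) for monsters > 0 (faster: O(1)).

-- ===== PORT A =====
-- A's loop body as a named step function (the loop variable i is ignored)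
def pvStep (damage : Int) (st : Int × Int × Int × Int) : Int × Int × Int × Int :=
  if st.1 = 3 then (0 + 1, st.2.1 + 1, st.2.2.1 + damage, st.2.2.2 - damage)
  else (st.1 + 1, st.2.1, st.2.2.1, st.2.2.2)

def my_case (health : Int) (monsters : Int) (damage : Int) : String :=
  -- state (counter, hits, damage_sum, health), loop body transliterated
  let r := (PySem.List.pyRange 0 monsters 1).foldl
    (fun st _ => pvStep damage st) (0, 0, 0, health)
  if r.2.2.2 ≤ 0 then "hero died"
  else "hits: " ++ PySem.Int.toStr r.2.1 ++ ", damage: " ++ PySem.Int.toStr r.2.2.1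
       ++ ", health: " ++ PySem.Int.toStr r.2.2.2

-- ===== PORT B =====
def my_case_alt (health : Int) (monsters : Int) (damage : Int) : String :=
  let hits := if monsters > 0 then PySem.Int.floordiv (monsters - 1) 3 else 0
  let damage_sum := hits * damage
  let health' := health - damage_sum
  if health' ≤ 0 then "hero died"
  else "hits: " ++ PySem.Int.toStr hits ++ ", damage: " ++ PySem.Int.toStr damage_sum
       ++ ", health: " ++ PySem.Int.toStr health'

-- ===== PRECONDITION & SPEC =====
def Spec_my_case (health : Int) (monsters : Int) (damage : Int) (out : String) : Prop := out = my_case_alt health monsters damage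
instance (health : Int) (monsters : Int) (damage : Int) (out : String) : Decidable (Spec_my_case health monsters damage out) := by unfold Spec_my_case; infer_instance

-- ===== CLAIM (what is proved, stated in full; the proofs are below) =====
def Claim_equal_my_case : Prop := ∀ (health : Int) (monsters : Int) (damage : Int), Dom_my_case health monsters damage → Spec_my_case health monsters damage (my_case health monsters damage)

-- ===== LEMMAS AND PROOFS =====

theorem foldl_const_iterate {α β : Type} (f : α → α) (l : List β) (s : α) :
    l.foldl (fun a _ => f a) s = f^[l.length] s := by
  induction l generalizing s with
  | nil => rfl
  | cons x xs ih =>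
    simp [List.foldl, ih, Function.iterate_succ_apply]

theorem pvStep_iterate (d h : Int) (n : Nat) (hn : 1 ≤ n) :
    (pvStep d)^[n] (0, 0, 0, h) =
      ((((n - 1) % 3 : Nat) : Int) + 1, (((n - 1) / 3 : Nat) : Int),
        (((n - 1) / 3 : Nat) : Int) * d, h - (((n - 1) / 3 : Nat) : Int) * d) := by
  induction n with
  | zero => omega
  | succ m ih =>
    rcases Nat.eq_or_lt_of_le hn with h1 | h1
    · rw [← h1]
      simp [pvStep]
    · have hm : 1 ≤ m := by omega
      rw [Function.iterate_succ_apply', ih hm]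
      by_cases hr : (m - 1) % 3 = 2
      · have e1 : m % 3 = 0 := by omega
        have e2 : m / 3 = (m - 1) / 3 + 1 := by omega
        rw [pvStep, if_pos (by omega : ((((m - 1) % 3 : Nat) : Int) + 1) = 3)]
        simp only [Nat.add_sub_cancel, e1, e2, Prod.mk.injEq]
        and_intros <;> push_cast <;> ring
      · have e1 : m % 3 = (m - 1) % 3 + 1 := by omega
        have e2 : m / 3 = (m - 1) / 3 := by omega
        rw [pvStep, if_neg (by omega : ¬ ((((m - 1) % 3 : Nat) : Int) + 1) = 3)]
        simp only [Nat.add_sub_cancel, e1, e2, Prod.mk.injEq]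
        and_intros <;> push_cast <;> ring

-- ===== VERDICT (by name: the statement is the Claim_ definition above) =====
theorem my_case_spec : Claim_equal_my_case := by
  intro health monsters damage _
  show my_case health monsters damage = my_case_alt health monsters damage
  unfold my_case my_case_alt
  by_cases hm : monsters > 0
  · have hlen : (PySem.List.pyRange 0 monsters 1).length = monsters.toNat := by
      simpa using PySem.List.length_pyRange_one 0 monsters
    have hn : 1 ≤ monsters.toNat := by omega
    rw [foldl_const_iterate (pvStep damage), hlen, pvStep_iterate damage health monsters.toNat hn]
    simp [hm]
  · have hnil : PySem.List.pyRange 0 monsters 1 = [] :=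
      PySem.List.pyRange_one_eq_nil (by omega)
    simp [hnil, hm]
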